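-- pv_equiv track=rewrite | github.com/HexedCoder/Advent-of-Code | 2015/Day1/solution.py | track_santa
-- ===== SOURCE A (Python) =====
-- def track_santa(text_file):
--     number = 0
--     index = 1
--     first = [0, 0]
--
--     for char in text_file:
--         if char == "(":
--             number += 1
--         elif char == ")":
--             number -= 1
--
--         if number < 0 and not first[0]:
--             first[0] = 1
--             first[1] = index
--
--         index += 1
--
--     return number, first[1]
-- ===== SOURCE B (Python) =====
-- def track_santa(text_file):
--     number = text_file.count("(") - text_file.count(")")
--     first = 0
--     stack = []
--     for pos, char in enumerate(text_file, 1):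
--         if char == "(":
--             stack.append(pos)
--         elif char == ")":
--             if stack:
--                 stack.pop()
--             else:
--                 first = pos
--                 break
--     return number, first
-- ===== Notes on version B (the rewrite author's own statement) =====
-- stated objective: alternative
-- what changed: B finds the first-negative position as the position of the first unmatched ')' using a paren-matching stack (push position on '(', pop on ')', break at the first ')' with an empty stack) instead of A's running counter with a flag, and computes the net floor with two str.count library scans instead of accumulating it.
import Mathlib
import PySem

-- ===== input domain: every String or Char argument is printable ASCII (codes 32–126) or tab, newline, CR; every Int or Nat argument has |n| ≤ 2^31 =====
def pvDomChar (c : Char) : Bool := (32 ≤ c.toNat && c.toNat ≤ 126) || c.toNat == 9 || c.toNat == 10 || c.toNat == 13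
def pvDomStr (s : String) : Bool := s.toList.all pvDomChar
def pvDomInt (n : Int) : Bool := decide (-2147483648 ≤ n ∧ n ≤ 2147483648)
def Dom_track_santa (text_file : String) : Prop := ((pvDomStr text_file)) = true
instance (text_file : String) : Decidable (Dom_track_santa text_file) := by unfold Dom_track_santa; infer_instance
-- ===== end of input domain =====

-- B finds the first-negative position as the first unmatched ')' via a paren-matching stack
-- and takes the net floor from two str.count scans, instead of A's fused counter-and-flag pass
-- (objective: alternative).

-- ===== PORT A =====
-- A's single for-loop: state (number, first0, first1, index)
def trackLoopA : List Char → Int × Int × Int × Int → Int × Int × Int × Int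
  | [], st => st
  | c :: rest, (number, f0, f1, index) =>
    let number' := if c = '(' then number + 1 else if c = ')' then number - 1 else number
    let st' := if number' < 0 ∧ f0 = 0 then ((1 : Int), index) else (f0, f1)
    trackLoopA rest (number', st'.1, st'.2, index + 1)

def track_santa (text_file : String) : Int × Int :=
  let st := trackLoopA text_file.toList (0, 0, 0, 1)
  (st.1, st.2.2.1)

-- ===== PORT B =====
-- B's stack loop: push the position on '(', pop on ')', return the position of the
-- first ')' seen with an empty stack (the first unmatched close), 0 if none.
def trackStackLoop : List Char → List Int → Int → Int
  | [], _, _ => 0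
  | c :: rest, stack, pos =>
    if c = '(' then trackStackLoop rest (stack ++ [pos]) (pos + 1)
    else if c = ')' then
      match stack with
      | [] => pos
      | _ :: _ => trackStackLoop rest stack.dropLast (pos + 1)
    else trackStackLoop rest stack (pos + 1)

def track_santa_alt (text_file : String) : Int × Int :=
  let number : Int := (PySem.Str.count text_file "(" : Int) - (PySem.Str.count text_file ")" : Int)
  (number, trackStackLoop text_file.toList [] 1)

-- ===== PRECONDITION & SPEC =====
def Spec_track_santa (text_file : String) (out : Int × Int) : Prop := out = track_santa_alt text_file
instance (text_file : String) (out : Int × Int) : Decidable (Spec_track_santa text_file out) := by unfold Spec_track_santa; infer_instance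

-- ===== CLAIM (what is proved, stated in full; the proofs are below) =====
def Claim_equal_track_santa : Prop := ∀ (text_file : String), Dom_track_santa text_file → Spec_track_santa text_file (track_santa text_file)

-- ===== LEMMAS AND PROOFS =====

-- Chars.count with a single-character needle is List.count
theorem count_go_singleton (c : Char) (l : List Char) (fuel : Nat) (acc : Nat)
    (h : l.length ≤ fuel) : PySem.Chars.count.go [c] fuel l acc = acc + l.count c := by
  induction l generalizing fuel acc with
  | nil => cases fuel <;> simp [PySem.Chars.count.go]
  | cons x t ih =>
    cases fuel with
    | zero => simp at h
    | succ f =>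
      simp only [List.length_cons, Nat.succ_le_succ_iff] at h
      by_cases hx : x = c
      · subst hx
        have hpre : List.isPrefixOf [x] (x :: t) = true := by
          simp [List.isPrefixOf]
        simp [PySem.Chars.count.go, hpre, ih _ _ h]
        omega
      · have hpre : List.isPrefixOf [c] (x :: t) = false := by
          simp [List.isPrefixOf]; exact fun hh => absurd hh.symm hx
        simp [PySem.Chars.count.go, hpre, ih _ _ h, hx]

theorem chars_count_singleton (c : Char) (l : List Char) :
    PySem.Chars.count l [c] = l.count c := by
  simp [PySem.Chars.count, count_go_singleton c l l.length 0 le_rfl]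

-- first component of A's loop
theorem trackLoopA_fst (l : List Char) (n f0 f1 i : Int) :
    (trackLoopA l (n, f0, f1, i)).1
      = n + (l.count '(' : Int) - (l.count ')' : Int) := by
  induction l generalizing n f0 f1 i with
  | nil => simp [trackLoopA]
  | cons c t ih =>
    simp only [trackLoopA]
    rw [ih]
    by_cases h1 : c = '(' <;> by_cases h2 : c = ')' <;>
      simp [h1, h2] <;> ring

-- once A's flag is set, f1 is frozen
theorem trackLoopA_frozen (l : List Char) (n f1 i : Int) :
    (trackLoopA l (n, 1, f1, i)).2.2.1 = f1 := by
  induction l generalizing n i with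
  | nil => simp [trackLoopA]
  | cons c t ih => simp [trackLoopA, ih]

-- with the flag unset and A's counter equal to the stack height, A's recorded first-negative
-- position is B's stack-search result
theorem trackLoopA_snd_stack (l : List Char) (s : List Int) (i : Int) :
    (trackLoopA l ((s.length : Int), 0, 0, i)).2.2.1 = trackStackLoop l s i := by
  induction l generalizing s i with
  | nil => simp [trackLoopA, trackStackLoop]
  | cons c t ih =>
    by_cases h1 : c = '('
    · subst h1
      have hlen : (s.length : Int) + 1 = (((s ++ [i]).length : Int)) := by
        simp
      have hnn2 : ¬ ((((s ++ [i]).length : Int)) < 0) := by omega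
      have hnn3 : ¬ ((s.length : Int) + 1 < 0) := by omega
      simp only [trackLoopA, trackStackLoop]
      norm_num
      simp only [if_neg hnn3]
      rw [hlen]
      exact ih (s ++ [i]) (i + 1)
    · by_cases h2 : c = ')'
      · subst h2
        cases s with
        | nil =>
          simp [trackLoopA, trackStackLoop, h1, trackLoopA_frozen]
        | cons x xs =>
          have hlen : ((x :: xs).length : Int) - 1 = (((x :: xs).dropLast.length : Int)) := by
            simp [List.length_dropLast]
          have hnn2 : ¬ ((((x :: xs).dropLast.length : Int)) < 0) := by omega
          have hnn3 : ¬ ((xs.length : Int) < 0) := by omega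
          simp only [trackLoopA, trackStackLoop, h1, List.length_cons]
          norm_num
          simp only [if_neg hnn3]
          have hds : ((xs.length : Int)) = (((x :: xs).dropLast.length : Int)) := by simp
          rw [hds]
          exact ih (x :: xs).dropLast (i + 1)
      · have hnn : ¬ ((s.length : Int) < 0) := by omega
        simp [trackLoopA, trackStackLoop, h1, h2, hnn, ih]

-- ===== VERDICT (by name: the statement is the Claim_ definition above) =====
theorem track_santa_spec : Claim_equal_track_santa := by
  intro s _
  unfold Spec_track_santa track_santa track_santa_alt
  simp only [PySem.Str.count_eq]
  have h1 : "(".toList = ['('] := rfl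
  have h2 : ")".toList = [')'] := rfl
  rw [h1, h2, chars_count_singleton, chars_count_singleton, trackLoopA_fst]
  have := trackLoopA_snd_stack s.toList [] 1
  simp at this
  simp [this]
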